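-- pv_equiv track=rewrite | github.com/karimullahchowdhury12/AttendanceLog-Parser | process_attendance.py | search_summary_by_employee
-- ===== SOURCE A (Python) =====
-- from typing import Dict, List, Tuple
--
-- def search_summary_by_employee(summary: Dict, emp_code: str) -> List[Dict]:
--     results = []
--     for date in sorted(summary.keys()):
--         for record in summary[date]:
--             if record['emp_code'] == emp_code:
--                 results.append({
--                     'date': date,
--                     **record
--                 })
--     return results
-- ===== SOURCE B (Python) =====
-- def search_summary_by_employee(summary, emp_code):
--     # Selection strategy: no sort call at all; repeatedly pick the smallest
--     # remaining date, emit its matching records, and drop it from the pool.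
--     remaining = list(summary.keys())
--     results = []
--     while remaining:
--         m = remaining[0]
--         for d in remaining[1:]:
--             if d < m:
--                 m = d
--         remaining.remove(m)
--         for record in summary[m]:
--             if record['emp_code'] == emp_code:
--                 results.append({'date': m, **record})
--     return results
-- ===== Notes on version B (the rewrite author's own statement) =====
-- stated objective: alternative
-- what changed: B never calls a sort: instead of sorting the date keys and scanning them, it runs a selection loop that repeatedly finds the minimum remaining date by a linear scan, removes it from the pool, and emits that date's matching records, so ordered output falls out of repeated minimum extraction.
import Mathlib
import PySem

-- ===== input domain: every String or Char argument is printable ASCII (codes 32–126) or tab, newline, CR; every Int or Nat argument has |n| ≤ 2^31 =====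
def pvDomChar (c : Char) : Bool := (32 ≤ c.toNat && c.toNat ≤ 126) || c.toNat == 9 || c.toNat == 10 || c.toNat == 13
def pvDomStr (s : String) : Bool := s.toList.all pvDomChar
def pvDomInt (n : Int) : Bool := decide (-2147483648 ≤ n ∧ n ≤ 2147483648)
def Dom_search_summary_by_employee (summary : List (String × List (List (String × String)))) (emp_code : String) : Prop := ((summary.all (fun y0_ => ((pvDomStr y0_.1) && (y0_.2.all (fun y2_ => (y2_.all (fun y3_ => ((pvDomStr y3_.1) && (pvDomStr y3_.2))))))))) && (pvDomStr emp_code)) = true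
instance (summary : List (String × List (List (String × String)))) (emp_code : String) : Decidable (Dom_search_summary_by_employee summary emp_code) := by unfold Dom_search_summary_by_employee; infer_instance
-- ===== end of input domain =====

-- B replaces A's sort-the-keys-then-scan with a sort-free selection loop: repeatedly find the
-- minimum remaining date by a linear scan, remove it, and emit its matching records; same value.

-- ===== PORT A =====
-- record['emp_code'] == emp_code  (the record is a Python dict; lookup never raises inside Pre_)
def pvMatch (emp_code : String) (record : List (String × String)) : Bool :=
  (PySem.Dict.ofList record).get? "emp_code" == some emp_code

-- {'date': date, **record}  (dict literal: 'date' inserted first, record's pairs merged on top)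
def pvMerge (date : String) (record : List (String × String)) : List (String × String) :=
  (PySem.Dict.ofList (("date", date) :: record)).items

def search_summary_by_employee (summary : List (String × List (List (String × String)))) (emp_code : String) : List (List (String × String)) :=
  let d := PySem.Dict.ofList summary
  (PySem.List.sorted d.keys (fun k => k) false).foldl
    (fun results date =>
      (d.getD date []).foldl
        (fun results record =>
          if pvMatch emp_code record then results ++ [pvMerge date record] else results)
        results)
    []

-- ===== PORT B =====
-- m = remaining[0]; for x in remaining[1:]: if x < m: m = x
def pvFindMin (k : String) (rest : List String) : String :=
  rest.foldl (fun m x => if x < m then x else m) k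

theorem pvFindMin_mem (k : String) (rest : List String) : pvFindMin k rest ∈ k :: rest := by
  unfold pvFindMin
  induction rest generalizing k with
  | nil => simp
  | cons x rest ih =>
      simp only [List.foldl_cons]
      rcases List.mem_cons.mp (ih (if x < k then x else k)) with h | h
      · rw [h]; split_ifs <;> simp
      · exact List.mem_cons_of_mem _ (List.mem_cons_of_mem _ h)

-- the while loop: emit the minimal date's matching records, drop it, continue on the rest
def pvSelect (d : PySem.Dict String (List (List (String × String)))) (emp_code : String) :
    List String → List (List (String × String))
  | [] => []
  | k :: rest =>
      let m := pvFindMin k rest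
      ((d.getD m []).foldl
        (fun results record =>
          if pvMatch emp_code record then results ++ [pvMerge m record] else results)
        [])
      ++ pvSelect d emp_code ((k :: rest).erase m)
  termination_by l => l.length
  decreasing_by
    have := List.length_erase_of_mem (pvFindMin_mem k rest)
    simp_all

def search_summary_by_employee_alt (summary : List (String × List (List (String × String)))) (emp_code : String) : List (List (String × String)) :=
  let d := PySem.Dict.ofList summary
  pvSelect d emp_code d.keys

-- ===== PRECONDITION & SPEC =====
-- Pre_ excludes exactly the inputs where Python A raises KeyError: some record (of a date that
-- survives dict construction) has no 'emp_code' key.  B raises KeyError there too.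
def Pre_search_summary_by_employee (summary : List (String × List (List (String × String)))) (emp_code : String) : Prop :=
  ∀ recs ∈ (PySem.Dict.ofList summary).values, ∀ r ∈ recs, (PySem.Dict.ofList r).contains "emp_code" = true
instance (summary : List (String × List (List (String × String)))) (emp_code : String) : Decidable (Pre_search_summary_by_employee summary emp_code) := by unfold Pre_search_summary_by_employee; infer_instance

def pvWitness_search_summary_by_employee : (List (String × List (List (String × String)))) × String :=
  ([("2024-01-02", [[("emp_code", "E1"), ("name", "Bob")]]),
    ("2024-01-01", [[("emp_code", "E2")], [("emp_code", "E1"), ("name", "Ann")]])], "E1")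

def Spec_search_summary_by_employee (summary : List (String × List (List (String × String)))) (emp_code : String) (out : List (List (String × String))) : Prop := out = search_summary_by_employee_alt summary emp_code
instance (summary : List (String × List (List (String × String)))) (emp_code : String) (out : List (List (String × String))) : Decidable (Spec_search_summary_by_employee summary emp_code out) := by unfold Spec_search_summary_by_employee; infer_instance

-- ===== CLAIM (what is proved, stated in full; the proofs are below) =====
def Claim_equal_search_summary_by_employee : Prop := ∀ (summary : List (String × List (List (String × String)))) (emp_code : String), Dom_search_summary_by_employee summary emp_code → Pre_search_summary_by_employee summary emp_code → Spec_search_summary_by_employee summary emp_code (search_summary_by_employee summary emp_code)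

-- ===== LEMMAS AND PROOFS =====

theorem pvFindMin_le (k : String) (rest : List String) :
    ∀ y ∈ k :: rest, pvFindMin k rest ≤ y := by
  unfold pvFindMin
  induction rest generalizing k with
  | nil => intro y hy; rw [List.mem_singleton.mp hy]; exact le_refl _
  | cons x rest ih =>
      intro y hy
      simp only [List.foldl_cons]
      have hm : (if x < k then x else k) ≤ k ∧ (if x < k then x else k) ≤ x := by
        split_ifs with h
        · exact ⟨le_of_lt h, le_refl _⟩
        · exact ⟨le_refl _, le_of_not_gt h⟩
      have hself : List.foldl (fun m x => if x < m then x else m) (if x < k then x else k) rest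
          ≤ (if x < k then x else k) := ih _ _ (List.mem_cons_self)
      rcases List.mem_cons.mp hy with rfl | hy
      · exact le_trans hself hm.1
      · rcases List.mem_cons.mp hy with rfl | hy
        · exact le_trans hself hm.2
        · exact ih _ y (List.mem_cons_of_mem _ hy)

theorem pv_sorted_select (m : String) (ks : List String) (hm : m ∈ ks)
    (hmin : ∀ y ∈ ks, m ≤ y) :
    PySem.List.sorted ks (fun x => x) false
      = m :: PySem.List.sorted (ks.erase m) (fun x => x) false := by
  apply PySem.List.sorted_id_eq_of_perm_of_pairwise
  · exact ((PySem.List.sorted_perm (ks.erase m) (fun x => x) false).cons m).trans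
      (List.perm_cons_erase hm).symm
  · refine List.pairwise_cons.mpr ⟨?_, ?_⟩
    · intro y hy
      exact hmin y ((List.erase_subset) ((PySem.List.mem_sorted _ _ _ _).mp hy))
    · exact PySem.List.sorted_pairwise (ks.erase m) (fun x => x)

theorem pvSelect_eq_flatMap (d : PySem.Dict String (List (List (String × String))))
    (emp_code : String) :
    ∀ (ks : List String),
      pvSelect d emp_code ks
        = (PySem.List.sorted ks (fun x => x) false).flatMap
            (fun date => ((d.getD date []).filter (fun r => pvMatch emp_code r)).map (pvMerge date)) := by
  have H : ∀ (n : Nat) (ks : List String), ks.length ≤ n →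
      pvSelect d emp_code ks
        = (PySem.List.sorted ks (fun x => x) false).flatMap
            (fun date => ((d.getD date []).filter (fun r => pvMatch emp_code r)).map (pvMerge date)) := by
    intro n
    induction n with
    | zero =>
        intro ks hks
        rw [List.length_eq_zero_iff.mp (Nat.le_zero.mp hks)]
        simp [pvSelect, PySem.List.sorted]
    | succ n ih =>
        intro ks hks
        match ks with
        | [] => simp [pvSelect, PySem.List.sorted]
        | k :: rest =>
        have hm := pvFindMin_mem k rest
        have hlen : ((k :: rest).erase (pvFindMin k rest)).length ≤ n := by
          rw [List.length_erase_of_mem hm]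
          simp only [List.length_cons] at hks ⊢
          omega
        rw [pvSelect, ih _ hlen,
            pv_sorted_select (pvFindMin k rest) (k :: rest) hm (pvFindMin_le k rest),
            List.flatMap_cons, PySem.List.foldl_append_if]
        simp
  intro ks
  exact H ks.length ks (le_refl _)

-- ===== VERDICT (by name: the statement is the Claim_ definition above) =====

theorem search_summary_by_employee_spec : Claim_equal_search_summary_by_employee := by
  intro summary emp_code _ _
  unfold Spec_search_summary_by_employee search_summary_by_employee search_summary_by_employee_alt
  simp only []
  rw [pvSelect_eq_flatMap]
  generalize PySem.List.sorted (PySem.Dict.ofList summary).keys (fun x => x) false = ds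
  induction ds using List.reverseRecOn with
  | nil => rfl
  | append_singleton ds k ih =>
      rw [List.foldl_append, List.flatMap_append, ← ih, List.foldl_cons, List.foldl_nil,
          PySem.List.foldl_append_if, List.flatMap_singleton]
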